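-- pv_equiv track=rewrite | github.com/wUWu11/ics31 | lab/lab4.py | hide_vowels
-- ===== SOURCE A (Python) =====
-- def is_vowel(a:str):
--     #return ture if this character is a vowel and false otherwise
--     return a in ['a','e','i','o','u','A','E','I','O','U']
--
-- def hide_vowels(a:str)->str:
--     #which every vowel in the parameter is replaced with a hyphen ("-") and all other characters remain unchanged
--     result = ''
--     for i in a:
--         if is_vowel(i) ==True:
--             result = result + '-'
--         else:
--             result = result + i
--     return result
-- ===== SOURCE B (Python) =====
-- def hide_vowels(a: str) -> str:
--     # Ten staged passes: each pass rewrites all occurrences of one vowel to '-'.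
--     # Correct because '-' is not a vowel, so later passes never touch earlier rewrites.
--     for v in 'aeiouAEIOU':
--         a = a.replace(v, '-')
--     return a
-- ===== Notes on version B (the rewrite author's own statement) =====
-- stated objective: faster
-- what changed: B traverses by vowel, not by position: ten staged whole-string str.replace passes (one per vowel) replace A's per-character branch-and-concatenate loop; correct since a hyphen is not a vowel so passes do not interfere.
import Mathlib
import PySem

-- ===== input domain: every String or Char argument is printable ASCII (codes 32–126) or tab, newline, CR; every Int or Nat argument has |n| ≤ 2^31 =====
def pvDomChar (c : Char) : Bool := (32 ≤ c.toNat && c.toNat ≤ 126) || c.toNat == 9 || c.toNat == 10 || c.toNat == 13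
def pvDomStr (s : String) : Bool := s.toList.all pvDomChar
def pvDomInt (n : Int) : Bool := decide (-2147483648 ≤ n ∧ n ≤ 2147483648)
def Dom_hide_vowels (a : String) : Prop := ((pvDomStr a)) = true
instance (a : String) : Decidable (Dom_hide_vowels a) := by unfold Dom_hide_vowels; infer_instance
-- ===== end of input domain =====

-- B traverses by vowel instead of by position: ten staged whole-string replace
-- passes (one per vowel) instead of A's per-character branch-and-concat loop.

-- ===== PORT A =====
def is_vowel (a : Char) : Bool :=
  ['a','e','i','o','u','A','E','I','O','U'].contains a

def hide_vowels (a : String) : String :=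
  a.toList.foldl
    (fun result i =>
      if is_vowel i = true then result ++ "-" else result ++ String.ofList [i]) ""

-- ===== PORT B =====
-- for v in 'aeiouAEIOU': a = a.replace(v, '-')
def hide_vowels_alt (a : String) : String :=
  "aeiouAEIOU".toList.foldl (fun s v => PySem.Str.replace s (String.ofList [v]) "-") a

-- ===== PRECONDITION & SPEC =====
def Spec_hide_vowels (a : String) (out : String) : Prop := out = hide_vowels_alt a
instance (a : String) (out : String) : Decidable (Spec_hide_vowels a out) := by unfold Spec_hide_vowels; infer_instance

-- ===== CLAIM (what is proved, stated in full; the proofs are below) =====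
def Claim_equal_hide_vowels : Prop := ∀ (a : String), Dom_hide_vowels a → Spec_hide_vowels a (hide_vowels a)

-- ===== LEMMAS AND PROOFS =====

-- replacing a single character v by '-' is a per-character map
def hv_sub (v : Char) (c : Char) : Char := if c = v then '-' else c

theorem hv_go_single (v : Char) :
    ∀ (fuel : Nat) (l acc : List Char), l.length ≤ fuel →
      PySem.Chars.replace.go [v] ['-'] fuel l acc
        = acc.reverse ++ l.map (hv_sub v) := by
  intro fuel
  induction fuel with
  | zero =>
    intro l acc h
    have : l = [] := List.length_eq_zero_iff.mp (Nat.le_zero.mp h)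
    subst this
    simp [PySem.Chars.replace.go]
  | succ n ih =>
    intro l acc h
    cases l with
    | nil => simp [PySem.Chars.replace.go]
    | cons c t =>
      simp only [PySem.Chars.replace.go]
      by_cases hcv : c = v
      · subst hcv
        have hp : [c].isPrefixOf (c :: t) = true := by simp [List.isPrefixOf]
        rw [if_pos hp]
        simp only [List.length_cons, List.length_nil, List.drop_succ_cons, List.drop_zero,
          List.reverse_cons, List.reverse_nil, List.nil_append]
        rw [ih t _ (by simpa using Nat.le_of_succ_le_succ h)]
        simp [hv_sub]
      · have hp : [v].isPrefixOf (c :: t) = false := by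
          simp [List.isPrefixOf]
          exact fun hE => hcv hE.symm
        rw [if_neg (by simp [hp])]
        rw [ih t _ (by simpa using Nat.le_of_succ_le_succ h)]
        simp [hv_sub, hcv]

theorem hv_replace_single (v : Char) (l : List Char) :
    PySem.Chars.replace l [v] ['-'] = l.map (hv_sub v) := by
  rw [PySem.Chars.replace]
  simp only [List.isEmpty_cons, if_false, Bool.false_eq_true]
  simpa using hv_go_single v l.length l [] le_rfl

theorem hv_str_replace_single (v : Char) (s : String) :
    (PySem.Str.replace s (String.ofList [v]) "-").toList = s.toList.map (hv_sub v) := by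
  rw [show (PySem.Str.replace s (String.ofList [v]) "-").toList
        = PySem.Chars.replace s.toList (String.ofList [v]).toList "-".toList from
      PySem.Str.toList_replace s (String.ofList [v]) "-"]
  have h1 : (String.ofList [v]).toList = [v] := by simp
  have h2 : "-".toList = ['-'] := by decide
  rw [h1, h2, hv_replace_single]

-- A's loop builds the per-character map directly
theorem hv_foldlA (l : List Char) (s : String) :
    l.foldl (fun result i =>
      if is_vowel i = true then result ++ "-" else result ++ String.ofList [i]) s
      = s ++ String.ofList (l.map (fun c => if is_vowel c = true then '-' else c)) := by
  induction l generalizing s with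
  | nil => simp [String.ofList_nil]
  | cons c l ih =>
    simp only [List.foldl_cons, List.map_cons, ih]
    have hdash : "-" = String.ofList ['-'] := by decide
    by_cases h : is_vowel c = true
    · rw [if_pos h, if_pos h, String.append_assoc, hdash, ← String.ofList_append]
      rfl
    · rw [if_neg h, if_neg h, String.append_assoc, ← String.ofList_append]
      rfl

set_option maxHeartbeats 1000000 in
theorem hv_vowel_list : "aeiouAEIOU".toList = ['a','e','i','o','u','A','E','I','O','U'] := by decide

-- the ten staged single-vowel substitutions compose to A's branch
theorem hv_chain (c : Char) :
    hv_sub 'U' (hv_sub 'O' (hv_sub 'I' (hv_sub 'E' (hv_sub 'A'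
      (hv_sub 'u' (hv_sub 'o' (hv_sub 'i' (hv_sub 'e' (hv_sub 'a' c))))))))) =
      (if is_vowel c = true then '-' else c) := by
  by_cases h : c = 'a' ∨ c = 'e' ∨ c = 'i' ∨ c = 'o' ∨ c = 'u' ∨
      c = 'A' ∨ c = 'E' ∨ c = 'I' ∨ c = 'O' ∨ c = 'U'
  · rcases h with h|h|h|h|h|h|h|h|h|h <;> subst h <;> decide
  · rcases not_or.mp h with ⟨h1, h⟩
    rcases not_or.mp h with ⟨h2, h⟩
    rcases not_or.mp h with ⟨h3, h⟩
    rcases not_or.mp h with ⟨h4, h⟩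
    rcases not_or.mp h with ⟨h5, h⟩
    rcases not_or.mp h with ⟨h6, h⟩
    rcases not_or.mp h with ⟨h7, h⟩
    rcases not_or.mp h with ⟨h8, h9⟩
    rcases not_or.mp h9 with ⟨h9, h10⟩
    have hv : is_vowel c = false := by
      simp [is_vowel, h1, h2, h3, h4, h5, h6, h7, h8, h9, h10]
    simp [hv_sub, hv, h1, h2, h3, h4, h5, h6, h7, h8, h9, h10]

set_option maxHeartbeats 2000000 in
theorem hv_alt_eq (a : String) :
    (hide_vowels_alt a).toList
      = a.toList.map (fun c => if is_vowel c = true then '-' else c) := by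
  unfold hide_vowels_alt
  have hvs : "aeiouAEIOU".toList = ['a','e','i','o','u','A','E','I','O','U'] := hv_vowel_list
  rw [hvs]
  simp only [List.foldl_cons, List.foldl_nil]
  simp only [hv_str_replace_single, List.map_map]
  apply List.map_congr_left
  intro c _
  simp only [Function.comp_apply]
  exact hv_chain c

-- ===== VERDICT (by name: the statement is the Claim_ definition above) =====
theorem hide_vowels_spec : Claim_equal_hide_vowels := by
  intro a _
  unfold Spec_hide_vowels
  apply String.toList_injective
  rw [hv_alt_eq]
  unfold hide_vowels
  rw [hv_foldlA a.toList ""]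
  simp
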